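-- pv_equiv track=rewrite | github.com/taconite/DDD-Differentiable-Dual-Decomposition | lib/layers/test.py | generate_all_states
-- ===== SOURCE A (Python) =====
-- import copy
--
-- def generate_all_states(n_nodes, n_states):
--     all_states = [[]]
--     for n_idx in range(n_nodes):
--         new_states = []
--         for state in all_states:
--             for s_idx in range(n_states):
--                 new_state = copy.copy(state)
--                 new_state.append(s_idx)
--                 new_states.append(new_state)
--
--         all_states = new_states
--
--     return all_states
-- ===== SOURCE B (Python) =====
-- def generate_all_states(n_nodes, n_states):
--     if n_nodes <= 0:
--         return [[]]
--     if n_states <= 0: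
--         return []
--     return [
--         [(k // n_states ** (n_nodes - 1 - j)) % n_states for j in range(n_nodes)]
--         for k in range(n_states ** n_nodes)
--     ]
-- ===== Notes on version B (the rewrite author's own statement) =====
-- stated objective: alternative
-- what changed: B replaces A's iterative rebuild of the whole state list (append one coordinate per round) by a closed-form mixed-radix enumeration: the k-th tuple is computed directly from k by division and modulus.
import Mathlib
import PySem

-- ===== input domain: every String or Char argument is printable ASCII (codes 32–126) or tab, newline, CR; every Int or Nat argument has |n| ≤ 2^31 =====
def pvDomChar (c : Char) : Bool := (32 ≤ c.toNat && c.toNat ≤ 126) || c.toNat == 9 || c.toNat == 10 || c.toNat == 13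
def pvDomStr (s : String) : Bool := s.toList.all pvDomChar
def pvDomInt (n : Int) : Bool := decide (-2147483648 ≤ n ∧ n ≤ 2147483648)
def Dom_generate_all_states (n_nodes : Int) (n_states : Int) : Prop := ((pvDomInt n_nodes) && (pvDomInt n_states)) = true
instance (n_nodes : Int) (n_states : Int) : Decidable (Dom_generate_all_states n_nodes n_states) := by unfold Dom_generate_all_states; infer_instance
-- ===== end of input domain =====

-- B computes each tuple directly from its index (mixed-radix digits) instead of rebuilding the list of states round by round; alternative decomposition, same cost.

-- ===== PORT A =====
def generate_all_states (n_nodes : Int) (n_states : Int) : List (List Int) :=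
  (PySem.List.pyRange 0 n_nodes 1).foldl
    (fun all_states _n_idx =>
      all_states.foldl
        (fun new_states state =>
          (PySem.List.pyRange 0 n_states 1).foldl
            (fun ns s_idx => ns ++ [state ++ [s_idx]]) new_states)
        [])
    [[]]

-- ===== PORT B =====
def generate_all_states_alt (n_nodes : Int) (n_states : Int) : List (List Int) :=
  if n_nodes ≤ 0 then [[]]
  else if n_states ≤ 0 then []
  else
    (PySem.List.pyRange 0 (n_states ^ n_nodes.toNat) 1).map (fun k =>
      (PySem.List.pyRange 0 n_nodes 1).map (fun j =>
        PySem.Int.mod (PySem.Int.floordiv k (n_states ^ (n_nodes - 1 - j).toNat)) n_states))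

-- ===== PRECONDITION & SPEC =====
def Spec_generate_all_states (n_nodes : Int) (n_states : Int) (out : List (List Int)) : Prop := out = generate_all_states_alt n_nodes n_states
instance (n_nodes : Int) (n_states : Int) (out : List (List Int)) : Decidable (Spec_generate_all_states n_nodes n_states out) := by unfold Spec_generate_all_states; infer_instance

-- ===== CLAIM (what is proved, stated in full; the proofs are below) =====
def Claim_equal_generate_all_states : Prop := ∀ (n_nodes : Int) (n_states : Int), Dom_generate_all_states n_nodes n_states → Spec_generate_all_states n_nodes n_states (generate_all_states n_nodes n_states)

-- ===== LEMMAS AND PROOFS =====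

-- one round of A's loop
def pvStep (m : Int) (states : List (List Int)) : List (List Int) :=
  states.foldl
    (fun new_states state =>
      (PySem.List.pyRange 0 m 1).foldl
        (fun ns s_idx => ns ++ [state ++ [s_idx]]) new_states)
    []

theorem pvStep_eq_flatMap (m : Int) (states : List (List Int)) :
    pvStep m states
      = states.flatMap (fun st => (PySem.List.pyRange 0 m 1).map (fun s => st ++ [s])) := by
  unfold pvStep
  suffices h : ∀ acc : List (List Int), states.foldl
      (fun new_states state =>
        (PySem.List.pyRange 0 m 1).foldl
          (fun ns s_idx => ns ++ [state ++ [s_idx]]) new_states) acc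
      = acc ++ states.flatMap (fun st => (PySem.List.pyRange 0 m 1).map (fun s => st ++ [s])) by
    simpa using h []
  induction states with
  | nil => intro acc; simp
  | cons st t ih =>
    intro acc
    rw [List.foldl_cons, PySem.List.foldl_append_singleton_eq_map, ih,
      List.flatMap_cons, List.append_assoc]

theorem pvFoldl_const {α β : Type} (f : β → β) (l : List α) (init : β) :
    l.foldl (fun acc _ => f acc) init = f^[l.length] init := by
  induction l generalizing init with
  | nil => rfl
  | cons x t ih => simp [List.foldl_cons, ih, Function.iterate_succ_apply]

theorem genA_eq_iterate (n_nodes n_states : Int) :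
    generate_all_states n_nodes n_states = (pvStep n_states)^[n_nodes.toNat] [[]] := by
  unfold generate_all_states
  have := pvFoldl_const (pvStep n_states) (PySem.List.pyRange 0 n_nodes 1) [[]]
  simp only [pvStep] at this
  rw [this, PySem.List.length_pyRange_one]
  norm_num

-- digits of k base m, big-endian, n positions (Nat level)
def pvDig (m n k : Nat) : List Int :=
  (List.range n).map (fun j => ((k / m ^ (n - 1 - j)) % m : Nat))

theorem pvDig_succ (m n q r : Nat) (hm : 0 < m) (hr : r < m) :
    pvDig m (n + 1) (q * m + r) = pvDig m n q ++ [(r : Int)] := by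
  unfold pvDig
  rw [List.range_succ, List.map_append]
  congr 1
  · apply List.map_congr_left
    intro j hj
    rw [List.mem_range] at hj
    have h1 : n + 1 - 1 - j = (n - 1 - j) + 1 := by omega
    have h3 : (q * m + r) / m = q := by
      rw [Nat.add_comm, Nat.add_mul_div_right _ _ hm, Nat.div_eq_of_lt hr, Nat.zero_add]
    have h2 : (q * m + r) / m ^ ((n - 1 - j) + 1) = q / m ^ (n - 1 - j) := by
      rw [pow_succ', ← Nat.div_div_eq_div_mul, h3]
    rw [h1, h2]
  · have h0 : (q * m + r) / m ^ (n + 1 - 1 - n) % m = r := by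
      have hz : n + 1 - 1 - n = 0 := by omega
      rw [hz, pow_zero, Nat.div_one, mul_comm q m, Nat.mul_add_mod, Nat.mod_eq_of_lt hr]
    simp only [List.map_cons, List.map_nil, h0]

theorem pvRange_mul_flatMap {α : Type} (a m : Nat) (f : Nat → α) :
    (List.range (a * m)).map f
      = (List.range a).flatMap (fun q => (List.range m).map (fun r => f (q * m + r))) := by
  induction a with
  | zero => simp
  | succ a ih =>
    rw [Nat.succ_mul, List.range_add, List.map_append, ih, List.range_succ,
      List.flatMap_append]
    simp

theorem pvIterate_eq (m : Int) (hm : 0 < m) (n : Nat) :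
    (pvStep m)^[n] [[]] = (List.range (m.toNat ^ n)).map (pvDig m.toNat n) := by
  induction n with
  | zero => simp [pvDig]
  | succ n ih =>
    rw [Function.iterate_succ_apply', ih, pvStep_eq_flatMap]
    have hrange : PySem.List.pyRange 0 m 1 = (List.range m.toNat).map (fun s : Nat => (s : Int)) := by
      rw [PySem.List.pyRange_one]
      simp
    rw [hrange, pow_succ, pvRange_mul_flatMap, List.flatMap_map]
    apply List.flatMap_congr
    intro q hq
    rw [List.mem_range] at hq
    rw [List.map_map]
    apply List.map_congr_left
    intro r hr
    rw [List.mem_range] at hr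
    exact (pvDig_succ m.toNat n q r (by omega) hr).symm

-- bridge to B's Int-level expression
theorem genB_main (n_nodes n_states : Int) (hn : 0 < n_nodes) (hm : 0 < n_states) :
    generate_all_states_alt n_nodes n_states
      = (List.range (n_states.toNat ^ n_nodes.toNat)).map (pvDig n_states.toNat n_nodes.toNat) := by
  obtain ⟨M, rfl⟩ : ∃ M : Nat, n_states = (M : Int) := ⟨n_states.toNat, (Int.toNat_of_nonneg hm.le).symm⟩
  obtain ⟨N, rfl⟩ : ∃ N : Nat, n_nodes = (N : Int) := ⟨n_nodes.toNat, (Int.toNat_of_nonneg hn.le).symm⟩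
  simp only [Int.toNat_natCast]
  unfold generate_all_states_alt
  rw [if_neg (by omega), if_neg (by omega)]
  simp only [Int.toNat_natCast]
  have hpow : ((M : Int)) ^ N = ((M ^ N : Nat) : Int) := by push_cast; ring
  have hlen : (((M ^ N : Nat) : Int) - 0).toNat = M ^ N := by omega
  have hlen2 : ((N : Int) - 0).toNat = N := by omega
  rw [hpow]
  simp only [PySem.List.pyRange_one, hlen, hlen2, List.map_map]
  apply List.map_congr_left
  intro k hk
  simp only [Function.comp_apply, zero_add]
  unfold pvDig
  apply List.map_congr_left
  intro j hj
  rw [List.mem_range] at hj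
  simp only [Function.comp_apply]
  have he : ((N : Int) - 1 - (j : Int)).toNat = N - 1 - j := by omega
  rw [he]
  have hpe : ((M : Int)) ^ (N - 1 - j) = ((M ^ (N - 1 - j) : Nat) : Int) := by push_cast; ring
  rw [hpe, PySem.Int.floordiv_natCast, PySem.Int.mod_natCast]

-- ===== VERDICT (by name: the statement is the Claim_ definition above) =====
theorem generate_all_states_spec : Claim_equal_generate_all_states := by
  intro n_nodes n_states _
  unfold Spec_generate_all_states
  rw [genA_eq_iterate]
  by_cases hn : n_nodes ≤ 0
  · have h0 : n_nodes.toNat = 0 := by omega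
    simp [h0, generate_all_states_alt, hn]
  · replace hn : 0 < n_nodes := by omega
    by_cases hm : n_states ≤ 0
    · have hstep : ∀ s, pvStep n_states s = [] := by
        intro s
        rw [pvStep_eq_flatMap, PySem.List.pyRange_one_eq_nil (by omega)]
        simp
      obtain ⟨k, hk⟩ : ∃ k, n_nodes.toNat = k + 1 := ⟨n_nodes.toNat - 1, by omega⟩
      rw [hk, Function.iterate_succ_apply, hstep, Function.iterate_fixed (hstep [])]
      simp [generate_all_states_alt, hn.not_ge, hm]
    · replace hm : 0 < n_states := by omega
      rw [pvIterate_eq n_states hm n_nodes.toNat, genB_main n_nodes n_states hn hm]
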